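-- pv_equiv track=rewrite | github.com/jeremybeeman/Steganography-Join-2-Images | bitshift_join.py | seedKeyExtract
-- ===== SOURCE A (Python) =====
-- def seedKeyExtract(seedKey):
--     #extracts the seed key created by seedKeyGen
--     seedLoc = [0, 0, 0, 0, 0, 0, 0]
--     currSeedLoc = 0
--     currNum = 0
--     #extracts the seed numbers
--     for i in range(0, len(seedKey)):
--         if ord(seedKey[i]) >= ord('a') and  ord(seedKey[i]) <= ord('z'): #if the letter, multiply letter by number
--             seedLoc[currSeedLoc] = currNum * (ord(seedKey[i])-ord('a')+1)
--             currSeedLoc += 1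
--             currNum = 0
--         elif ord(seedKey[i]) >= ord('0') and  ord(seedKey[i]) <= ord('9'): #if a number, number to be multiplied by letter
--             currNum = currNum * 10 + int(seedKey[i])
--         else:
--             raise Exception("not valid seed. All seeds consist of numbers and lowercase letters. Nothing else.")
--     return seedLoc
-- ===== SOURCE B (Python) =====
-- def seedKeyExtract(seedKey):
--     # tokenizer: each outer step consumes one (digit-run, letter) token
--     slots = [0, 0, 0, 0, 0, 0, 0]
--     k = 0
--     i = 0
--     n = len(seedKey)
--     while i < n:
--         num = 0
--         while i < n and ord('0') <= ord(seedKey[i]) <= ord('9'):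
--             num = num * 10 + (ord(seedKey[i]) - ord('0'))
--             i += 1
--         if i < n:
--             c = seedKey[i]
--             if not (ord('a') <= ord(c) <= ord('z')):
--                 raise Exception("not valid seed. All seeds consist of numbers and lowercase letters. Nothing else.")
--             slots[k] = num * (ord(c) - ord('a') + 1)
--             k += 1
--             i += 1
--     return slots
-- ===== Notes on version B (the rewrite author's own statement) =====
-- stated objective: alternative
-- what changed: A's flat per-character state machine carrying a running number and slot index across iterations is replaced by a two-level tokenizer: an outer loop that consumes one (digit-run, letter) token per step, with an inner loop reading each digit run.
import Mathlib
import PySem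

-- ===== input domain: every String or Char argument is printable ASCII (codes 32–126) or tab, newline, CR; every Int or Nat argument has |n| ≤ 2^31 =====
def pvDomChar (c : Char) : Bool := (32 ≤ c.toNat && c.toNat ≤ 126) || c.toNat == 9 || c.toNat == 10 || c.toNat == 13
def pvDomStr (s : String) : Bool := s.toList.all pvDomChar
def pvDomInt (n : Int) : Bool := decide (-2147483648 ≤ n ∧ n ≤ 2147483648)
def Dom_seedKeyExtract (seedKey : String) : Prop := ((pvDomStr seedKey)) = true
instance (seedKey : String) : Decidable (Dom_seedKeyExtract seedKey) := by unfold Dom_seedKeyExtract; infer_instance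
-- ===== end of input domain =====

-- B replaces A's flat per-character state machine by a two-level tokenizer (outer loop per
-- (digit-run, letter) token, inner loop consuming the digit run); objective: alternative.

-- ===== PORT A =====
-- A's single for-loop over the characters, carrying (seedLoc, currSeedLoc, currNum);
-- the 'raise' branch returns the current seedLoc (those inputs are outside Pre_).
def seedKeyA_loop : List Char → List Int → Nat → Int → List Int
  | [], seedLoc, _, _ => seedLoc
  | c :: rest, seedLoc, currSeedLoc, currNum =>
    if 97 ≤ c.toNat ∧ c.toNat ≤ 122 then
      seedKeyA_loop rest (seedLoc.set currSeedLoc (currNum * ((c.toNat : Int) - 97 + 1)))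
        (currSeedLoc + 1) 0
    else if 48 ≤ c.toNat ∧ c.toNat ≤ 57 then
      seedKeyA_loop rest seedLoc currSeedLoc (currNum * 10 + ((c.toNat : Int) - 48))
    else
      seedLoc

def seedKeyExtract (seedKey : String) : List Int :=
  seedKeyA_loop seedKey.toList [0, 0, 0, 0, 0, 0, 0] 0 0

-- ===== PORT B =====
-- inner while loop of Source B: consume a run of digits, return the number and the rest
def seedKeyB_num : List Char → Int → Int × List Char
  | [], num => (num, [])
  | c :: rest, num =>
    if 48 ≤ c.toNat ∧ c.toNat ≤ 57 then
      seedKeyB_num rest (num * 10 + ((c.toNat : Int) - 48))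
    else (num, c :: rest)

-- outer while loop of Source B; fuel makes the while loop total (one unit per outer step)
def seedKeyB_outer : Nat → List Char → List Int → Nat → List Int
  | 0, _, slots, _ => slots
  | fuel + 1, cs, slots, k =>
    match seedKeyB_num cs 0 with
    | (_, []) => slots
    | (num, c :: rest) =>
      if 97 ≤ c.toNat ∧ c.toNat ≤ 122 then
        seedKeyB_outer fuel rest (slots.set k (num * ((c.toNat : Int) - 97 + 1))) (k + 1)
      else slots

def seedKeyExtract_alt (seedKey : String) : List Int :=
  seedKeyB_outer (seedKey.toList.length + 1) seedKey.toList [0, 0, 0, 0, 0, 0, 0] 0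

-- ===== PRECONDITION & SPEC =====
-- Pre_ excludes exactly the inputs where A raises: any character that is neither a digit
-- nor a lowercase letter (Exception), or more than 7 lowercase letters (IndexError).
def Pre_seedKeyExtract (seedKey : String) : Prop :=
  seedKey.toList.all (fun c => decide ((48 ≤ c.toNat ∧ c.toNat ≤ 57) ∨ (97 ≤ c.toNat ∧ c.toNat ≤ 122))) = true ∧
  (seedKey.toList.filter (fun c => decide (97 ≤ c.toNat ∧ c.toNat ≤ 122))).length ≤ 7

instance (seedKey : String) : Decidable (Pre_seedKeyExtract seedKey) := by
  unfold Pre_seedKeyExtract; infer_instance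

def pvWitness_seedKeyExtract : String := "2a"

def Spec_seedKeyExtract (seedKey : String) (out : List Int) : Prop := out = seedKeyExtract_alt seedKey
instance (seedKey : String) (out : List Int) : Decidable (Spec_seedKeyExtract seedKey out) := by unfold Spec_seedKeyExtract; infer_instance

-- ===== CLAIM (what is proved, stated in full; the proofs are below) =====
def Claim_equal_seedKeyExtract : Prop := ∀ (seedKey : String), Dom_seedKeyExtract seedKey → Pre_seedKeyExtract seedKey → Spec_seedKeyExtract seedKey (seedKeyExtract seedKey)

-- ===== LEMMAS AND PROOFS =====

lemma seedKeyB_num_len (cs : List Char) (num : Int) :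
    (seedKeyB_num cs num).2.length ≤ cs.length := by
  induction cs generalizing num with
  | nil => simp [seedKeyB_num]
  | cons c rest ih =>
    simp only [seedKeyB_num]
    split
    · exact le_trans (ih _) (Nat.le_succ _)
    · simp

-- A's loop, started anywhere inside a digit run, takes one tokenizer step
lemma A_loop_token (cs : List Char) (num : Int) (slots : List Int) (k : Nat) :
    seedKeyA_loop cs slots k num =
      match seedKeyB_num cs num with
      | (_, []) => slots
      | (n, c :: rest) =>
        if 97 ≤ c.toNat ∧ c.toNat ≤ 122 then
          seedKeyA_loop rest (slots.set k (n * ((c.toNat : Int) - 97 + 1))) (k + 1) 0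
        else slots := by
  induction cs generalizing num with
  | nil => simp [seedKeyA_loop, seedKeyB_num]
  | cons c rest ih =>
    by_cases hl : 97 ≤ c.toNat ∧ c.toNat ≤ 122
    · have hd : ¬ (48 ≤ c.toNat ∧ c.toNat ≤ 57) := by omega
      simp [seedKeyA_loop, seedKeyB_num, hl, hd]
    · by_cases hd : 48 ≤ c.toNat ∧ c.toNat ≤ 57
      · have hl' : ¬ (97 ≤ c.toNat ∧ c.toNat ≤ 122) := hl
        simp only [seedKeyA_loop, seedKeyB_num, if_pos hd, if_neg hl']
        exact ih _
      · simp [seedKeyA_loop, seedKeyB_num, hl, hd]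

lemma loop_eq_outer : ∀ (fuel : Nat) (cs : List Char), cs.length < fuel → ∀ (slots : List Int) (k : Nat),
    seedKeyA_loop cs slots k 0 = seedKeyB_outer fuel cs slots k := by
  intro fuel
  induction fuel with
  | zero => intro cs h; omega
  | succ fuel ih =>
    intro cs h slots k
    rw [A_loop_token]
    simp only [seedKeyB_outer]
    cases hb : seedKeyB_num cs 0 with
    | mk num r =>
      cases r with
      | nil => simp
      | cons c rest =>
        simp only
        split_ifs with hl
        · apply ih
          have hlen := seedKeyB_num_len cs 0
          rw [hb] at hlen
          simp only [List.length_cons] at hlen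
          omega
        · rfl

-- ===== VERDICT (by name: the statement is the Claim_ definition above) =====
theorem seedKeyExtract_spec : Claim_equal_seedKeyExtract := by
  intro seedKey _ _
  unfold Spec_seedKeyExtract seedKeyExtract seedKeyExtract_alt
  exact loop_eq_outer _ _ (Nat.lt_succ_self _) _ _
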